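-- pv_equiv track=rewrite | github.com/yfran022/Plataforma-de-Log-stica-y-Entregas | avance_2.py | asignar_repartidor
-- ===== SOURCE A (Python) =====
-- def asignar_repartidor(zona, **kwargs):
--     trabajadores = {
--         "yudis": ["marbella"],
--         "jose": ["torices"],
--         "gabriela": ["bicentenario"],
--         "sara": ["marbella", "torices"]
--     }
--
--     for nombre, zonas in trabajadores.items():
--         if zona in zonas:
--             return nombre
--
--     return "No disponible"
-- ===== SOURCE B (Python) =====
-- def asignar_repartidor(zona, **kwargs):
--     trabajadores = {
--         "yudis": ["marbella"],
--         "jose": ["torices"],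
--         "gabriela": ["bicentenario"],
--         "sara": ["marbella", "torices"]
--     }
--     mapa = {}
--     for nombre, zonas in trabajadores.items():
--         for z in zonas:
--             mapa.setdefault(z, nombre)
--     return mapa.get(zona, "No disponible")
-- ===== Notes on version B (the rewrite author's own statement) =====
-- stated objective: alternative
-- what changed: B inverts the worker->zones dict once into a zone->worker index (setdefault, so the first-listed worker wins) and answers with a single keyed lookup, instead of A's scan over workers with a membership test per worker.
import Mathlib
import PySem

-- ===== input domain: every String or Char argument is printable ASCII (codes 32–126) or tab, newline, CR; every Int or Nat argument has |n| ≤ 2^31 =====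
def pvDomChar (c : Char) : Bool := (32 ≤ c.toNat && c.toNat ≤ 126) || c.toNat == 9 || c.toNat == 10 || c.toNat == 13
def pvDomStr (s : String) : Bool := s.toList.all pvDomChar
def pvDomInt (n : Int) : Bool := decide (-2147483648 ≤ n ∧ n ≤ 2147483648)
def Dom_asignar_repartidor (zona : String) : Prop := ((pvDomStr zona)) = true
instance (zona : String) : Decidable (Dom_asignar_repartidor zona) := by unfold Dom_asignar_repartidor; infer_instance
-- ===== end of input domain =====

-- B builds a zone->worker reverse index once (setdefault: first-listed worker wins) and answers by one keyed lookup; alternative decomposition, same cost.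

-- ===== PORT A =====
-- the hardcoded trabajadores dict, as an insertion-ordered association list
def pvTrabajadores : List (String × List String) :=
  [("yudis", ["marbella"]), ("jose", ["torices"]),
   ("gabriela", ["bicentenario"]), ("sara", ["marbella", "torices"])]

-- the 'for nombre, zonas in trabajadores.items(): if zona in zonas: return nombre' loop
def pvScanA (zona : String) : List (String × List String) → String
  | [] => "No disponible"
  | (nombre, zonas) :: rest => if zonas.contains zona then nombre else pvScanA zona rest

def asignar_repartidor (zona : String) : String :=
  pvScanA zona pvTrabajadores

-- ===== PORT B =====
def asignar_repartidor_alt (zona : String) : String :=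
  let mapa : PySem.Dict String String :=
    pvTrabajadores.foldl
      (fun d p => p.2.foldl (fun d z => d.setdefault z p.1) d)
      PySem.Dict.empty
  mapa.getD zona "No disponible"

-- ===== PRECONDITION & SPEC =====
def Spec_asignar_repartidor (zona : String) (out : String) : Prop := out = asignar_repartidor_alt zona
instance (zona : String) (out : String) : Decidable (Spec_asignar_repartidor zona out) := by unfold Spec_asignar_repartidor; infer_instance

-- ===== CLAIM (what is proved, stated in full; the proofs are below) =====
def Claim_equal_asignar_repartidor : Prop := ∀ (zona : String), Dom_asignar_repartidor zona → Spec_asignar_repartidor zona (asignar_repartidor zona)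

-- ===== LEMMAS AND PROOFS =====
theorem pv_eq (zona : String) : asignar_repartidor zona = asignar_repartidor_alt zona := by
  unfold asignar_repartidor asignar_repartidor_alt pvTrabajadores
  by_cases h1 : zona = "marbella"
  · simp [pvScanA, h1, PySem.Dict.setdefault, PySem.Dict.getD, PySem.Dict.get?,
      PySem.Dict.empty, PySem.Dict.contains]
  by_cases h2 : zona = "torices"
  · simp [pvScanA, h2, PySem.Dict.setdefault, PySem.Dict.getD, PySem.Dict.get?,
      PySem.Dict.empty, PySem.Dict.contains]
  by_cases h3 : zona = "bicentenario"
  · simp [pvScanA, h3, PySem.Dict.setdefault, PySem.Dict.getD, PySem.Dict.get?,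
      PySem.Dict.empty, PySem.Dict.contains]
  · simp [pvScanA, h1, h2, h3, Ne.symm h1, Ne.symm h2, Ne.symm h3,
      PySem.Dict.setdefault, PySem.Dict.getD, PySem.Dict.get?,
      PySem.Dict.empty, PySem.Dict.contains]

-- ===== VERDICT (by name: the statement is the Claim_ definition above) =====
theorem asignar_repartidor_spec : Claim_equal_asignar_repartidor := by
  intro zona _
  unfold Spec_asignar_repartidor
  exact pv_eq zona
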